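-- pv_equiv track=rewrite | github.com/Bambomb1303/fastapi-maib50 | main.py | get_rating_img
-- ===== SOURCE A (Python) =====
-- def get_rating_img(rating: int) -> str:
--     thresholds = [15000, 14500, 14000, 13000, 12000, 10000, 7000, 4000, 2000, 1000, 0]
--     filenames = [
--         "UI_CMN_DXRating_11.png", "UI_CMN_DXRating_10.png", "UI_CMN_DXRating_09.png",
--         "UI_CMN_DXRating_08.png", "UI_CMN_DXRating_07.png", "UI_CMN_DXRating_06.png",
--         "UI_CMN_DXRating_05.png", "UI_CMN_DXRating_04.png", "UI_CMN_DXRating_03.png",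
--         "UI_CMN_DXRating_02.png", "UI_CMN_DXRating_01.png"
--     ]
--     for threshold, filename in zip(thresholds, filenames):
--         if rating >= threshold:
--             return filename
--     return filenames[-1]
-- ===== SOURCE B (Python) =====
-- def get_rating_img(rating: int) -> str:
--     asc = [0, 1000, 2000, 4000, 7000, 10000, 12000, 13000, 14000, 14500, 15000]
--     names = [
--         "UI_CMN_DXRating_01.png", "UI_CMN_DXRating_02.png", "UI_CMN_DXRating_03.png",
--         "UI_CMN_DXRating_04.png", "UI_CMN_DXRating_05.png", "UI_CMN_DXRating_06.png",
--         "UI_CMN_DXRating_07.png", "UI_CMN_DXRating_08.png", "UI_CMN_DXRating_09.png",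
--         "UI_CMN_DXRating_10.png", "UI_CMN_DXRating_11.png"
--     ]
--     # binary search: rightmost index with asc[idx] <= rating
--     lo, hi = 0, len(asc)
--     while lo < hi:
--         mid = (lo + hi) // 2
--         if rating >= asc[mid]:
--             lo = mid + 1
--         else:
--             hi = mid
--     return names[max(lo - 1, 0)]
-- ===== Notes on version B (the rewrite author's own statement) =====
-- stated objective: alternative
-- what changed: Replaces A's linear scan over descending thresholds with a binary search (hand-rolled bisect_right) over the ascending thresholds, with a clamped index into the ascending filename list.
import Mathlib
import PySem

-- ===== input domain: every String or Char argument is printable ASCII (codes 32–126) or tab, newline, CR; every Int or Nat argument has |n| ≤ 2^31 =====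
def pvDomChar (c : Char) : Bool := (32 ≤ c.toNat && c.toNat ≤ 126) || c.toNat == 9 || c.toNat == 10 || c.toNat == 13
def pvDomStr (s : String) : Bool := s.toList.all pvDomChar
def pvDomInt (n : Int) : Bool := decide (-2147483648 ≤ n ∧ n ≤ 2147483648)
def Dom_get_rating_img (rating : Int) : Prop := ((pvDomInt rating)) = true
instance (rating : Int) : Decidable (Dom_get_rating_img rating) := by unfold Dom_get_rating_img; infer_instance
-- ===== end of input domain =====

-- B replaces A's linear descending threshold scan with a binary search over the
-- ascending thresholds (objective: alternative/idiomatic; same tiny fixed cost).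

-- ===== PORT A =====
-- A's zipped (threshold, filename) pairs, descending, as in the Python source
def aPairs : List (Int × String) :=
  [(15000, "UI_CMN_DXRating_11.png"), (14500, "UI_CMN_DXRating_10.png"),
   (14000, "UI_CMN_DXRating_09.png"), (13000, "UI_CMN_DXRating_08.png"),
   (12000, "UI_CMN_DXRating_07.png"), (10000, "UI_CMN_DXRating_06.png"),
   (7000, "UI_CMN_DXRating_05.png"), (4000, "UI_CMN_DXRating_04.png"),
   (2000, "UI_CMN_DXRating_03.png"), (1000, "UI_CMN_DXRating_02.png"),
   (0, "UI_CMN_DXRating_01.png")]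

-- the for-loop: first pair with rating >= threshold
def aLoop (rating : Int) : List (Int × String) → Option String
  | [] => none
  | (t, f) :: rest => if rating ≥ t then some f else aLoop rating rest

def get_rating_img (rating : Int) : String :=
  match aLoop rating aPairs with
  | some f => f
  | none => "UI_CMN_DXRating_01.png"   -- filenames[-1]

-- ===== PORT B =====
def bAsc : List Int := [0, 1000, 2000, 4000, 7000, 10000, 12000, 13000, 14000, 14500, 15000]
def bNames : List String :=
  ["UI_CMN_DXRating_01.png", "UI_CMN_DXRating_02.png", "UI_CMN_DXRating_03.png",
   "UI_CMN_DXRating_04.png", "UI_CMN_DXRating_05.png", "UI_CMN_DXRating_06.png",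
   "UI_CMN_DXRating_07.png", "UI_CMN_DXRating_08.png", "UI_CMN_DXRating_09.png",
   "UI_CMN_DXRating_10.png", "UI_CMN_DXRating_11.png"]

-- Source B's while-loop; lo, hi are non-negative list indices throughout, so Nat
def bSearch (rating : Int) (lo hi : Nat) : Nat :=
  if lo < hi then
    let mid := (lo + hi) / 2
    if rating ≥ bAsc.getD mid 0 then bSearch rating (mid + 1) hi
    else bSearch rating lo mid
  else lo
termination_by hi - lo
decreasing_by all_goals omega

def get_rating_img_alt (rating : Int) : String :=
  -- names[max(lo - 1, 0)]: Nat subtraction clamps at 0 exactly like max(lo-1,0)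
  bNames.getD (bSearch rating 0 bAsc.length - 1) ""

-- ===== PRECONDITION & SPEC =====
def Spec_get_rating_img (rating : Int) (out : String) : Prop := out = get_rating_img_alt rating
instance (rating : Int) (out : String) : Decidable (Spec_get_rating_img rating out) := by unfold Spec_get_rating_img; infer_instance

-- ===== CLAIM (what is proved, stated in full; the proofs are below) =====
def Claim_equal_get_rating_img : Prop := ∀ (rating : Int), Dom_get_rating_img rating → Spec_get_rating_img rating (get_rating_img rating)

-- ===== LEMMAS AND PROOFS =====

-- ===== VERDICT (by name: the statement is the Claim_ definition above) =====
-- leaf: empty search interval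
theorem bs_leaf (r : Int) (k : Nat) : bSearch r k k = k := by
  rw [bSearch.eq_def]; simp

theorem bs_0_1 (r : Int) : bSearch r 0 1 = if r ≥ 0 then 1 else 0 := by
  rw [bSearch.eq_def]; norm_num [bAsc, bs_leaf]

theorem bs_0_2 (r : Int) : bSearch r 0 2 = if r ≥ 1000 then 2 else if r ≥ 0 then 1 else 0 := by
  rw [bSearch.eq_def]; norm_num [bAsc, bs_leaf, bs_0_1]

theorem bs_3_4 (r : Int) : bSearch r 3 4 = if r ≥ 4000 then 4 else 3 := by
  rw [bSearch.eq_def]; norm_num [bAsc, bs_leaf]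

theorem bs_3_5 (r : Int) : bSearch r 3 5 = if r ≥ 7000 then 5 else if r ≥ 4000 then 4 else 3 := by
  rw [bSearch.eq_def]; norm_num [bAsc, bs_leaf, bs_3_4]

theorem bs_0_5 (r : Int) : bSearch r 0 5 =
    if r ≥ 2000 then (if r ≥ 7000 then 5 else if r ≥ 4000 then 4 else 3)
    else if r ≥ 1000 then 2 else if r ≥ 0 then 1 else 0 := by
  rw [bSearch.eq_def]; norm_num [bAsc, bs_3_5, bs_0_2]

theorem bs_6_7 (r : Int) : bSearch r 6 7 = if r ≥ 12000 then 7 else 6 := by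
  rw [bSearch.eq_def]; norm_num [bAsc, bs_leaf]

theorem bs_6_8 (r : Int) : bSearch r 6 8 = if r ≥ 13000 then 8 else if r ≥ 12000 then 7 else 6 := by
  rw [bSearch.eq_def]; norm_num [bAsc, bs_leaf, bs_6_7]

theorem bs_9_10 (r : Int) : bSearch r 9 10 = if r ≥ 14500 then 10 else 9 := by
  rw [bSearch.eq_def]; norm_num [bAsc, bs_leaf]

theorem bs_9_11 (r : Int) : bSearch r 9 11 = if r ≥ 15000 then 11 else if r ≥ 14500 then 10 else 9 := by
  rw [bSearch.eq_def]; norm_num [bAsc, bs_leaf, bs_9_10]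

theorem bs_6_11 (r : Int) : bSearch r 6 11 =
    if r ≥ 14000 then (if r ≥ 15000 then 11 else if r ≥ 14500 then 10 else 9)
    else if r ≥ 13000 then 8 else if r ≥ 12000 then 7 else 6 := by
  rw [bSearch.eq_def]; norm_num [bAsc, bs_9_11, bs_6_8]

theorem bs_0_11 (r : Int) : bSearch r 0 11 =
    if r ≥ 10000 then
      (if r ≥ 14000 then (if r ≥ 15000 then 11 else if r ≥ 14500 then 10 else 9)
       else if r ≥ 13000 then 8 else if r ≥ 12000 then 7 else 6)
    else
      (if r ≥ 2000 then (if r ≥ 7000 then 5 else if r ≥ 4000 then 4 else 3)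
       else if r ≥ 1000 then 2 else if r ≥ 0 then 1 else 0) := by
  rw [bSearch.eq_def]; norm_num [bAsc, bs_6_11, bs_0_5]

set_option maxHeartbeats 2000000 in
theorem get_rating_img_spec : Claim_equal_get_rating_img := by
  intro rating _
  unfold Spec_get_rating_img get_rating_img get_rating_img_alt aPairs
  simp only [aLoop]
  rw [show bAsc.length = 11 from rfl, bs_0_11]
  split_ifs <;> first | rfl | omega
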